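-- pv_equiv track=rewrite | github.com/madans2984/uno | uno_text_view_helpers.py | other_players_as_big_card
-- ===== SOURCE A (Python) =====
-- def other_players_as_big_card(players_rep):
--     """
--     Add more blank lines to the top and bottom of a list of strings in order to
--     make it the same size as a big card.
--
--     This is used for displaying the current card and player diamond next to each other.
--     """
--     big_card_lines = 11
--     big_card_players_rep = []
--     blank_line = " " * 21
--     space = " "*6
--     while len(big_card_players_rep) < (big_card_lines - len(players_rep))/2:
--         big_card_players_rep.append(blank_line)
--
--     for line in players_rep:
--         big_card_players_rep.append(space+line)
--
--     while len(big_card_players_rep) < big_card_lines: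
--         big_card_players_rep.append(blank_line)
--
--     return big_card_players_rep
-- ===== SOURCE B (Python) =====
-- def other_players_as_big_card(players_rep):
--     """Pad a player representation to the 11-line big-card height by growing
--     the indented block symmetrically (top first) until it is tall enough."""
--     blank_line = " " * 21
--     lines = ["      " + line for line in players_rep]
--     while len(lines) < 11:
--         lines = [blank_line] + lines
--         if len(lines) < 11:
--             lines = lines + [blank_line]
--     return lines
-- ===== Notes on version B (the rewrite author's own statement) =====
-- stated objective: alternative
-- what changed: Instead of A's two counting while-loops (top count via len < (11-n)/2, then fill to 11 at the bottom), B builds the indented block first and grows it symmetrically from the middle out, alternately prepending and appending one blank line until it is 11 lines tall.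
import Mathlib
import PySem

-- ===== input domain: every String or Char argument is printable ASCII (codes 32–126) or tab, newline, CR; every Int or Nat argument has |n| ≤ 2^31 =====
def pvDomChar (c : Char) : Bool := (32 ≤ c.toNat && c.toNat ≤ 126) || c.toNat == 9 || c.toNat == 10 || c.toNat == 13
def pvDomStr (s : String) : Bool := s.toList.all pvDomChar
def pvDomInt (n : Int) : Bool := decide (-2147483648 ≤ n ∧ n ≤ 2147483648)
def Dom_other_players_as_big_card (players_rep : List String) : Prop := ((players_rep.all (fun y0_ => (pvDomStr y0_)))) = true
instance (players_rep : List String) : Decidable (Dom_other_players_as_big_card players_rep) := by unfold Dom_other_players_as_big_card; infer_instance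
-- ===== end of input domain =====

-- B replaces A's two counting while-loops by symmetric middle-out growth
-- (prepend a blank, then append one, until 11 lines); objective: alternative.
-- Loops are ported with a fuel parameter purely as a totality guard: each loop
-- appends/prepends toward the fixed height 11, so 11 units of fuel always suffice.

-- ===== PORT A =====
def pvBlankLine : String := "                     "

-- first while loop of A: append blank lines while len(acc) < (11 - n)/2
-- (the float comparison len < (11-n)/2 is exact here: it is equivalent to 2*len < 11-n)
def pvPadTop : Nat → Int → List String → List String
  | 0, _, acc => acc
  | fuel + 1, n, acc =>
    if 2 * (acc.length : Int) < 11 - n then pvPadTop fuel n (acc ++ [pvBlankLine]) else acc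

-- last while loop of A: append blank lines while len(acc) < 11
def pvPadBot : Nat → List String → List String
  | 0, acc => acc
  | fuel + 1, acc =>
    if (acc.length : Int) < 11 then pvPadBot fuel (acc ++ [pvBlankLine]) else acc

def other_players_as_big_card (players_rep : List String) : List String :=
  pvPadBot 11 ((players_rep.foldl (fun acc line => acc ++ ["      " ++ line]) (pvPadTop 11 (players_rep.length : Int) [])))

-- ===== PORT B =====
-- B's while loop: grow symmetrically (top first) until 11 lines tall
def pvGrow : Nat → List String → List String
  | 0, lines => lines
  | fuel + 1, lines =>
    if lines.length < 11 then
      if (pvBlankLine :: lines).length < 11 then pvGrow fuel ((pvBlankLine :: lines) ++ [pvBlankLine])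
      else pvBlankLine :: lines
    else lines

def other_players_as_big_card_alt (players_rep : List String) : List String :=
  pvGrow 11 (players_rep.map (fun line => "      " ++ line))

-- ===== PRECONDITION & SPEC =====
def Spec_other_players_as_big_card (players_rep : List String) (out : List String) : Prop := out = other_players_as_big_card_alt players_rep
instance (players_rep : List String) (out : List String) : Decidable (Spec_other_players_as_big_card players_rep out) := by unfold Spec_other_players_as_big_card; infer_instance

-- ===== CLAIM (what is proved, stated in full; the proofs are below) =====
def Claim_equal_other_players_as_big_card : Prop := ∀ (players_rep : List String), Dom_other_players_as_big_card players_rep → Spec_other_players_as_big_card players_rep (other_players_as_big_card players_rep)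

-- ===== LEMMAS AND PROOFS =====

theorem pvRep_comm (a : String) (k : Nat) (t : List String) :
    List.replicate k a ++ a :: t = a :: (List.replicate k a ++ t) := by
  induction k with
  | zero => simp
  | succ k ih => simp [List.replicate_succ, ih]

theorem pvPadTop_eq (fuel : Nat) (n : Int) (acc : List String)
    (hf : ((11 - n - 2 * (acc.length : Int)).toNat + 1) / 2 ≤ fuel) :
    pvPadTop fuel n acc = acc ++ List.replicate (((11 - n - 2 * (acc.length : Int)).toNat + 1) / 2) pvBlankLine := by
  induction fuel generalizing acc with
  | zero =>
    have h0 : ((11 - n - 2 * (acc.length : Int)).toNat + 1) / 2 = 0 := by omega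
    rw [pvPadTop]
    simp [h0]
  | succ fuel ih =>
    rw [pvPadTop]
    split_ifs with h
    · rw [ih (acc ++ [pvBlankLine])
        (by simp only [List.length_append, List.length_cons, List.length_nil]; push_cast; omega)]
      have hk : ((11 - n - 2 * (acc.length : Int)).toNat + 1) / 2
          = ((11 - n - 2 * (((acc ++ [pvBlankLine]).length : Nat) : Int)).toNat + 1) / 2 + 1 := by
        simp only [List.length_append, List.length_cons, List.length_nil]
        push_cast
        omega
      rw [hk, List.append_assoc]
      congr 1
    · have h0 : (11 - n - 2 * (acc.length : Int)).toNat = 0 := by omega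
      simp [h0]

theorem pvPadBot_eq (fuel : Nat) (acc : List String) (hf : (11 - (acc.length : Int)).toNat ≤ fuel) :
    pvPadBot fuel acc = acc ++ List.replicate ((11 - (acc.length : Int)).toNat) pvBlankLine := by
  induction fuel generalizing acc with
  | zero =>
    have h0 : (11 - (acc.length : Int)).toNat = 0 := by omega
    rw [pvPadBot]
    simp [h0]
  | succ fuel ih =>
    rw [pvPadBot]
    split_ifs with h
    · rw [ih (acc ++ [pvBlankLine]) (by simp; omega)]
      have hk : (11 - (acc.length : Int)).toNat
          = (11 - (((acc ++ [pvBlankLine]).length : Nat) : Int)).toNat + 1 := by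
        simp only [List.length_append, List.length_cons, List.length_nil]
        push_cast
        omega
      rw [hk, List.append_assoc]
      congr 1
    · have h0 : (11 - (acc.length : Int)).toNat = 0 := by omega
      simp [h0]

theorem pvFoldl_append (players_rep : List String) (acc : List String) :
    players_rep.foldl (fun acc line => acc ++ ["      " ++ line]) acc
      = acc ++ players_rep.map (fun line => "      " ++ line) := by
  induction players_rep generalizing acc with
  | nil => simp
  | cons x xs ih => simp [List.foldl_cons, ih, List.append_assoc]

-- B's growth loop in closed form: ⌈(11-m)/2⌉ blanks above, ⌊(11-m)/2⌋ below
theorem pvGrow_eq (fuel : Nat) (lines : List String) (hf : 11 - lines.length ≤ 2 * fuel) :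
    pvGrow fuel lines = List.replicate ((12 - lines.length) / 2) pvBlankLine
      ++ lines ++ List.replicate ((11 - lines.length) / 2) pvBlankLine := by
  induction fuel generalizing lines with
  | zero =>
    have ht : (12 - lines.length) / 2 = 0 := by omega
    have hb : (11 - lines.length) / 2 = 0 := by omega
    rw [pvGrow]
    simp [ht, hb]
  | succ fuel ih =>
    rw [pvGrow]
    split_ifs with h h1
    · have hlen : ((pvBlankLine :: lines) ++ [pvBlankLine]).length = lines.length + 2 := by simp
      have h1' : lines.length + 1 < 11 := by simpa using h1
      rw [ih ((pvBlankLine :: lines) ++ [pvBlankLine]) (by rw [hlen]; omega)]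
      have ht : (12 - lines.length) / 2 = (12 - ((pvBlankLine :: lines) ++ [pvBlankLine]).length) / 2 + 1 := by
        rw [hlen]; omega
      have hb : (11 - lines.length) / 2 = (11 - ((pvBlankLine :: lines) ++ [pvBlankLine]).length) / 2 + 1 := by
        rw [hlen]; omega
      rw [ht, hb]
      simp only [List.replicate_succ, List.cons_append, List.append_assoc, List.nil_append]
      rw [pvRep_comm]
    · have hm : lines.length = 10 := by
        simp only [List.length_cons] at h1
        omega
      have ht : (12 - lines.length) / 2 = 1 := by omega
      have hb : (11 - lines.length) / 2 = 0 := by omega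
      rw [ht, hb]
      simp
    · have ht : (12 - lines.length) / 2 = 0 := by omega
      have hb : (11 - lines.length) / 2 = 0 := by omega
      simp [ht, hb]

-- ===== VERDICT (by name: the statement is the Claim_ definition above) =====
theorem other_players_as_big_card_spec : Claim_equal_other_players_as_big_card := by
  intro players_rep _
  unfold Spec_other_players_as_big_card other_players_as_big_card other_players_as_big_card_alt
  rw [pvPadTop_eq 11 _ [] (by simp; omega), pvFoldl_append,
    pvPadBot_eq _ _ (by omega), pvGrow_eq 11 _ (by omega)]
  simp only [List.nil_append, List.length_append, List.length_replicate, List.length_map,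
    List.length_nil, Nat.cast_zero, mul_zero, sub_zero, List.append_assoc]
  have htop : ((11 - (players_rep.length : Int)).toNat + 1) / 2
      = (12 - players_rep.length) / 2 := by omega
  rw [htop]
  have hbot : (11 - (((12 - players_rep.length) / 2 + players_rep.length : Nat) : Int)).toNat
      = (11 - players_rep.length) / 2 := by omega
  rw [hbot]
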